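-- pv_equiv track=rewrite | github.com/ShouNLAK/HUIT-Python | KTL1 - Buổi 6.py | Xuat_DH_First_Last
-- ===== SOURCE A (Python) =====
-- def Count_DonHang(list) :
--     Count = 0
--     for DonHang in list :
--         Count += 1
--     return Count
--
-- def Xuat_DH_First_Last(list) :
--     KQ = {}
--     Now = 0
--     Total = Count_DonHang(list)
--     for DonHang,SoLuong in list.items() :
--         Now += 1
--         if Now == 1 or Now == Total :
--             KQ[DonHang] = SoLuong
--     return KQ
-- ===== SOURCE B (Python) =====
-- def Xuat_DH_First_Last(list):
--     items = [*list.items()]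
--     if not items:
--         return {}
--     (k1, v1), (k2, v2) = items[0], items[-1]
--     return {k1: v1, k2: v2}
-- ===== Notes on version B (the rewrite author's own statement) =====
-- stated objective: idiomatic
-- what changed: Replaces the counting helper and the counter-gated loop over all entries with a single materialization of the items and direct access to the first and last entry.
import Mathlib
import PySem

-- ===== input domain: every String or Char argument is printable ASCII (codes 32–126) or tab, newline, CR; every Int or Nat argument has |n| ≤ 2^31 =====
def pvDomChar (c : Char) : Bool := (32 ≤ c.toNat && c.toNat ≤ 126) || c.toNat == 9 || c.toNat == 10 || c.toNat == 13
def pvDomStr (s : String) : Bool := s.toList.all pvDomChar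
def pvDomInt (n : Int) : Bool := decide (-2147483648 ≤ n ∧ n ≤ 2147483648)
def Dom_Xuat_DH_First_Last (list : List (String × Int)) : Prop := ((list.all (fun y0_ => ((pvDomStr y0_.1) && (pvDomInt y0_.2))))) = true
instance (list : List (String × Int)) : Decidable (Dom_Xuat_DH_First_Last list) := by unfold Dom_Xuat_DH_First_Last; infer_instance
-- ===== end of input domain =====

-- B builds the result from the first and last items directly instead of A's counting
-- helper plus counter-gated loop over every entry (objective: idiomatic).

-- ===== PORT A =====
def Count_DonHang (list : List (String × Int)) : Int :=
  list.foldl (fun Count _ => Count + 1) 0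

def Xuat_DH_First_Last (list : List (String × Int)) : List (String × Int) :=
  let Total := Count_DonHang list
  let r := list.foldl
    (fun (s : PySem.Dict String Int × Int) p =>
      let Now := s.2 + 1
      (if Now == 1 || Now == Total then s.1.insert p.1 p.2 else s.1, Now))
    (PySem.Dict.empty, 0)
  r.1.items

-- ===== PORT B =====
def Xuat_DH_First_Last_alt (list : List (String × Int)) : List (String × Int) :=
  match list with
  | [] => []
  | x :: xs =>
    let last := (x :: xs).getLast (by simp)
    (((PySem.Dict.empty : PySem.Dict String Int).insert x.1 x.2).insert last.1 last.2).items

-- ===== PRECONDITION & SPEC =====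
def Spec_Xuat_DH_First_Last (list : List (String × Int)) (out : List (String × Int)) : Prop := out = Xuat_DH_First_Last_alt list
instance (list : List (String × Int)) (out : List (String × Int)) : Decidable (Spec_Xuat_DH_First_Last list out) := by unfold Spec_Xuat_DH_First_Last; infer_instance

-- ===== CLAIM (what is proved, stated in full; the proofs are below) =====
def Claim_equal_Xuat_DH_First_Last : Prop := ∀ (list : List (String × Int)), Dom_Xuat_DH_First_Last list → Spec_Xuat_DH_First_Last list (Xuat_DH_First_Last list)

-- ===== LEMMAS AND PROOFS =====

lemma count_eq (l : List (String × Int)) (c : Int) :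
    l.foldl (fun Count _ => Count + 1) c = c + l.length := by
  induction l generalizing c with
  | nil => simp
  | cons y ys ih => simp [List.foldl, ih]; ring

-- After the first entry is handled, the loop only inserts the last entry (Now == 1 can
-- no longer fire and Now == Total fires exactly at the last element).
lemma loop_tail (Total : Int) (xs : List (String × Int)) :
    ∀ (n : Int) (d : PySem.Dict String Int), 1 ≤ n → Total = n + xs.length →
    (xs.foldl
      (fun (s : PySem.Dict String Int × Int) p =>
        (if (s.2 + 1 == 1 || s.2 + 1 == Total) = true then s.1.insert p.1 p.2 else s.1, s.2 + 1))
      (d, n)).1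
    = if h : xs = [] then d else d.insert (xs.getLast h).1 (xs.getLast h).2 := by
  induction xs with
  | nil => intro n d _ _; simp
  | cons y ys ih =>
    intro n d hn hT
    have hT' : Total = n + 1 + (ys.length : Int) := by simp at hT; omega
    simp only [List.foldl_cons]
    cases ys with
    | nil =>
      have hT2 : Total = n + 1 := by simpa using hT'
      have h2 : ((n + 1 : Int) == 1 || (n + 1 : Int) == Total) = true := by
        simp [hT2]
      rw [if_pos h2]
      simp
    | cons z zs =>
      have hT2 : Total = n + 2 + (zs.length : Int) := by
        simp only [List.length_cons] at hT'; push_cast at hT'; omega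
      have h2 : ((n + 1 : Int) == 1 || (n + 1 : Int) == Total) = false := by
        simp only [Bool.or_eq_false_iff, beq_eq_false_iff_ne, ne_eq]
        constructor <;> omega
      rw [if_neg (by simp [h2])]
      rw [ih (n + 1) d (by omega) (by push_cast [List.length_cons]; omega)]
      simp [List.getLast_cons]

-- ===== VERDICT (by name: the statement is the Claim_ definition above) =====
theorem Xuat_DH_First_Last_spec : Claim_equal_Xuat_DH_First_Last := by
  intro list _
  unfold Spec_Xuat_DH_First_Last Xuat_DH_First_Last Xuat_DH_First_Last_alt
  cases list with
  | nil => rfl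
  | cons x xs =>
    have hTot : Count_DonHang (x :: xs) = 1 + xs.length := by
      simp [Count_DonHang, count_eq]
    simp only [List.foldl_cons]
    have hfirst : (((0 : Int) + 1 == 1) || ((0 : Int) + 1 == Count_DonHang (x :: xs))) = true := by
      simp
    rw [if_pos hfirst]
    rw [loop_tail (Count_DonHang (x :: xs)) xs (0 + 1) _ (by norm_num)
        (by rw [hTot]; ring)]
    cases h : xs with
    | nil =>
      simp [PySem.Dict.insert_insert_self]
    | cons z zs =>
      simp [List.getLast_cons]
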